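-- pv_equiv track=rewrite | github.com/CharlesCNorton/AI-Bootstrap | refuted-unlikely-incomplete/Shifted-pythagorean/tests/test5b.py | get_95_solution_family
-- ===== SOURCE A (Python) =====
-- from math import sqrt, isqrt
-- from typing import Set, Tuple, List, Dict
--
-- def get_95_solution_family(z: int) -> List[Tuple[int, int]]:
--     """Get all solutions for a specific z-value known to have 95 solutions"""
--     solutions = []
--     z_squared_plus_1 = z*z + 1
--     max_x = isqrt(z_squared_plus_1 - 1)
--
--     for x in range(2, max_x + 1):
--         y_squared = z_squared_plus_1 - x*x
--         if y_squared > 0: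
--             y = isqrt(y_squared)
--             if y*y == y_squared and y > x:
--                 solutions.append((x, y))
--
--     return sorted(solutions)
-- ===== SOURCE B (Python) =====
-- from math import isqrt
--
-- def get_95_solution_family(z: int):
--     """Two-pointer scan over 2..isqrt(z*z+1) instead of per-x perfect-square tests."""
--     N = z * z + 1
--     solutions = []
--     lo, hi = 2, isqrt(N)
--     while lo < hi:
--         s = lo * lo + hi * hi
--         if s == N:
--             solutions.append((lo, hi))
--             lo += 1
--             hi -= 1
--         elif s < N:
--             lo += 1
--         else:
--             hi -= 1
--     return solutions
-- ===== Notes on version B (the rewrite author's own statement) =====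
-- stated objective: alternative
-- what changed: Replaced A's independent x-scan with a per-x isqrt perfect-square test (plus a final sort) by a single converging two-pointer pass lo/hi over [2, isqrt(z*z+1)] that emits solutions already in increasing-x order.
import Mathlib
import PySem

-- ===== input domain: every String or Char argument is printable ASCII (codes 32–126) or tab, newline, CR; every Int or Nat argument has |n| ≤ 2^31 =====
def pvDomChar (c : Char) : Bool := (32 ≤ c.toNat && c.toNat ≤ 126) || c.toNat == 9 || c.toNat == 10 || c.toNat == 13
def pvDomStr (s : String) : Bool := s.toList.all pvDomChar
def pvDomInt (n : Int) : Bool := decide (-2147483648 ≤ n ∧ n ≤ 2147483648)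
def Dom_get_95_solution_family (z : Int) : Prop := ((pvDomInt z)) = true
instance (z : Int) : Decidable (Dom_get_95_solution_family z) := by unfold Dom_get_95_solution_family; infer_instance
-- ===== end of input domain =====

-- B replaces A's per-x perfect-square scan (plus final sort) by one converging two-pointer
-- pass over [2, isqrt(z*z+1)]; same return value for every z (A is total, so no Pre_).

-- ===== PORT A =====
-- math.isqrt(n) = Nat.sqrt n, exact for 0 ≤ n (both arguments A passes are ≥ 0)
def pyIsqrt (n : Int) : Int := (Nat.sqrt n.toNat : Int)

def get_95_solution_family (z : Int) : List (Int × Int) :=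
  let zsp1 : Int := z * z + 1
  let maxX : Int := pyIsqrt (zsp1 - 1)
  let solutions : List (Int × Int) :=
    (PySem.List.pyRange 2 (maxX + 1) 1).foldl (fun acc x =>
      let ysq := zsp1 - x * x
      if ysq > 0 then
        let y := pyIsqrt ysq
        if y * y = ysq ∧ y > x then acc ++ [(x, y)] else acc
      else acc) []
  PySem.List.sorted2 solutions Prod.fst Prod.snd false

-- ===== PORT B =====
-- the while-loop of Source B: state (lo, hi, accumulated solutions)
def twoPtrLoop (N : Int) (lo hi : Int) (acc : List (Int × Int)) : List (Int × Int) :=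
  if h : lo < hi then
    let s := lo * lo + hi * hi
    if s = N then twoPtrLoop N (lo + 1) (hi - 1) (acc ++ [(lo, hi)])
    else if s < N then twoPtrLoop N (lo + 1) hi acc
    else twoPtrLoop N lo (hi - 1) acc
  else acc
termination_by (hi - lo).toNat
decreasing_by all_goals omega

def get_95_solution_family_alt (z : Int) : List (Int × Int) :=
  let N : Int := z * z + 1
  twoPtrLoop N 2 (pyIsqrt N) []

-- ===== PRECONDITION & SPEC =====
def Spec_get_95_solution_family (z : Int) (out : List (Int × Int)) : Prop := out = get_95_solution_family_alt z
instance (z : Int) (out : List (Int × Int)) : Decidable (Spec_get_95_solution_family z out) := by unfold Spec_get_95_solution_family; infer_instance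

-- ===== CLAIM (what is proved, stated in full; the proofs are below) =====
def Claim_equal_get_95_solution_family : Prop := ∀ (z : Int), Dom_get_95_solution_family z → Spec_get_95_solution_family z (get_95_solution_family z)

-- ===== LEMMAS AND PROOFS =====

-- the mathematical description both programs compute: for x running over [lo, hi],
-- pair x with y = isqrt(N - x²) when N − x² is a positive perfect square, x < y and y ≤ hi
def pvG (N hi x : Int) : Option (Int × Int) :=
  let ysq := N - x * x
  let y := pyIsqrt ysq
  if 0 < ysq ∧ y * y = ysq ∧ x < y ∧ y ≤ hi then some (x, y) else none

def pvPairs (N lo hi : Int) : List (Int × Int) :=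
  (PySem.List.pyRange lo (hi + 1) 1).filterMap (pvG N hi)

lemma pyIsqrt_nonneg (n : Int) : 0 ≤ pyIsqrt n := by
  simp [pyIsqrt]

lemma pyIsqrt_sq (y : Int) (hy : 0 ≤ y) : pyIsqrt (y * y) = y := by
  unfold pyIsqrt
  rw [Int.toNat_mul hy hy, Nat.sqrt_eq, Int.toNat_of_nonneg hy]

lemma pyIsqrt_le {n m : Int} (hm : 0 ≤ m) (h : m * m ≤ n) : m ≤ pyIsqrt n := by
  unfold pyIsqrt
  have h1 : m.toNat * m.toNat ≤ n.toNat := by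
    have := Int.toNat_mul hm hm
    omega
  have h2 := Nat.le_sqrt.mpr h1
  omega

lemma pyIsqrt_lt {n m : Int} (hn : 0 ≤ n) (hm : 0 ≤ m) (h : n < m * m) : pyIsqrt n < m := by
  unfold pyIsqrt
  have h1 : n.toNat < m.toNat * m.toNat := by
    have := Int.toNat_mul hm hm
    omega
  have h2 := Nat.sqrt_lt.mpr h1
  omega

-- A's loop body as a filterMap (no y ≤ hi bound yet)
def pvGA (N x : Int) : Option (Int × Int) :=
  let ysq := N - x * x
  let y := pyIsqrt ysq
  if 0 < ysq ∧ y * y = ysq ∧ x < y then some (x, y) else none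

lemma foldl_A (N : Int) :
    ∀ (l : List Int) (acc : List (Int × Int)),
      l.foldl (fun acc x =>
        let ysq := N - x * x
        if ysq > 0 then
          let y := pyIsqrt ysq
          if y * y = ysq ∧ y > x then acc ++ [(x, y)] else acc
        else acc) acc
      = acc ++ l.filterMap (pvGA N) := by
  intro l
  induction l with
  | nil => simp
  | cons x t ih =>
      intro acc
      rw [List.foldl_cons, List.filterMap_cons, ih]
      simp only [pvGA]
      split_ifs with h1 h2 h3 h3 <;> simp_all <;> omega

-- lo ≥ hi: no solutions left
lemma pvPairs_nil {N lo hi : Int} (h : hi ≤ lo) : pvPairs N lo hi = [] := by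
  apply List.filterMap_eq_nil_iff.mpr
  intro x hx
  rw [PySem.List.mem_pyRange_one] at hx
  simp only [pvG]
  rw [if_neg]
  rintro ⟨-, -, hxy, hyhi⟩
  omega

-- the y ≤ hi bound can drop to hi−1 when no solution in [a, hi) has partner hi
lemma filterMap_G_shrink {N a hi : Int}
    (h : ∀ x, a ≤ x → x < hi → x * x ≠ N - hi * hi) :
    (PySem.List.pyRange a hi 1).filterMap (pvG N hi)
      = (PySem.List.pyRange a hi 1).filterMap (pvG N (hi - 1)) := by
  apply List.filterMap_congr
  intro x hx
  rw [PySem.List.mem_pyRange_one] at hx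
  simp only [pvG]
  split_ifs with h1 h2 h2
  · rfl
  · exfalso
    obtain ⟨hp, hsq, hxy, hyhi⟩ := h1
    have hy : pyIsqrt (N - x * x) = hi := by
      by_contra hne
      exact h2 ⟨hp, hsq, hxy, by omega⟩
    apply h x hx.1 hx.2
    rw [hy] at hsq
    linarith
  · exact absurd ⟨h2.1, h2.2.1, h2.2.2.1, by omega⟩ h1
  · rfl

-- x = hi itself never qualifies (x < y ≤ hi is impossible)
lemma pvG_self (N hi : Int) : pvG N hi hi = none := by
  simp only [pvG]
  rw [if_neg]
  rintro ⟨-, -, hxy, hyhi⟩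
  omega

-- step when lo² + hi² = N: (lo, hi) is emitted, both pointers move
lemma pvPairs_step_eq {N lo hi : Int} (hlo : 2 ≤ lo) (hlh : lo < hi)
    (h : lo * lo + hi * hi = N) :
    pvPairs N lo hi = (lo, hi) :: pvPairs N (lo + 1) (hi - 1) := by
  unfold pvPairs
  rw [PySem.List.pyRange_one_cons (by omega), List.filterMap_cons]
  have hysq : N - lo * lo = hi * hi := by linarith
  have hglo : pvG N hi lo = some (lo, hi) := by
    simp [pvG, hysq, pyIsqrt_sq hi (by omega : (0:Int) ≤ hi), hlh,
      (by nlinarith : (0:Int) < hi * hi)]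
  rw [hglo]
  have hsplit : PySem.List.pyRange (lo + 1) (hi + 1) = PySem.List.pyRange (lo + 1) hi ++ [hi] := by
    have := PySem.List.pyRange_one_succ_right (a := lo + 1) (b := hi) (by omega)
    exact this
  rw [hsplit, List.filterMap_append]
  simp only [List.filterMap_cons, pvG_self N hi, List.filterMap_nil, List.append_nil]
  have hshrink := filterMap_G_shrink (N := N) (a := lo + 1) (hi := hi)
    (by intro x hx1 hx2 hxx
        have : x * x = lo * lo := by linarith
        nlinarith)
  rw [hshrink]
  rw [show hi - 1 + 1 = hi by omega]

-- step when lo² + hi² < N: x = lo has no partner ≤ hi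
lemma pvPairs_step_lo {N lo hi : Int} (hlo : 2 ≤ lo) (hlh : lo < hi)
    (h : lo * lo + hi * hi < N) :
    pvPairs N lo hi = pvPairs N (lo + 1) hi := by
  unfold pvPairs
  rw [PySem.List.pyRange_one_cons (by omega), List.filterMap_cons]
  have hglo : pvG N hi lo = none := by
    simp only [pvG]
    rw [if_neg]
    rintro ⟨hp, hsq, hxy, hyhi⟩
    have hy0 : 0 ≤ pyIsqrt (N - lo * lo) := pyIsqrt_nonneg _
    nlinarith
  rw [hglo]

-- step when lo² + hi² > N: y = hi has no partner ≥ lo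
lemma pvPairs_step_hi {N lo hi : Int} (hlo : 2 ≤ lo) (hlh : lo < hi)
    (h : N < lo * lo + hi * hi) :
    pvPairs N lo hi = pvPairs N lo (hi - 1) := by
  unfold pvPairs
  rw [PySem.List.pyRange_one_succ_right (a := lo) (b := hi) (by omega), List.filterMap_append]
  simp only [List.filterMap_cons, pvG_self N hi, List.filterMap_nil, List.append_nil]
  rw [filterMap_G_shrink (N := N) (a := lo) (hi := hi)
    (by intro x hx1 hx2 hxx
        nlinarith)]
  have : hi - 1 + 1 = hi := by omega
  rw [this]

-- the two-pointer loop computes pvPairs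
lemma twoPtrLoop_eq (N : Int) :
    ∀ (n : Nat) (lo hi : Int) (acc : List (Int × Int)), (hi - lo).toNat = n → 2 ≤ lo →
      twoPtrLoop N lo hi acc = acc ++ pvPairs N lo hi := by
  intro n
  induction n using Nat.strong_induction_on with
  | _ n ih =>
    intro lo hi acc hn hlo
    rw [twoPtrLoop]
    dsimp only
    split_ifs with h1 h2 h3
    · rw [ih ((hi - 1) - (lo + 1)).toNat (by omega) (lo + 1) (hi - 1) _ rfl (by omega),
        pvPairs_step_eq hlo h1 h2]
      simp
    · rw [ih (hi - (lo + 1)).toNat (by omega) (lo + 1) hi acc rfl (by omega),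
        pvPairs_step_lo hlo h1 h3]
    · rw [ih ((hi - 1) - lo).toNat (by omega) lo (hi - 1) acc rfl hlo,
        pvPairs_step_hi hlo h1 (lt_of_le_of_ne (not_lt.mp h3) (Ne.symm h2))]
    · rw [pvPairs_nil (by omega)]
      simp

-- an fst-strictly-increasing list is left unchanged by Python's tuple sort
lemma foldl_insertBy_append {α : Type} (before : α → α → Bool) :
    ∀ (xs acc : List α), (∀ x ∈ xs, ∀ y ∈ acc, before x y = false) →
      xs.Pairwise (fun a b => before b a = false) →
      xs.foldl (fun acc x => PySem.List.insertBy before x acc) acc = acc ++ xs := by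
  intro xs
  induction xs with
  | nil => simp
  | cons x t ih =>
      intro acc h hp
      have hx : PySem.List.insertBy before x acc = acc ++ [x] :=
        PySem.List.insertBy_of_forall_not_before before x acc (h x (by simp))
      rw [List.foldl_cons, hx, ih (acc ++ [x]) ?_ (List.Pairwise.of_cons hp)]
      · simp
      · intro a ha y hy
        rcases List.mem_append.mp hy with hy | hy
        · exact h a (by simp [ha]) y hy
        · simp at hy; subst hy
          exact (List.pairwise_cons.mp hp).1 a ha

lemma sorted2_eq_self (xs : List (Int × Int))
    (hp : xs.Pairwise (fun a b => a.1 < b.1)) :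
    PySem.List.sorted2 xs Prod.fst Prod.snd false = xs := by
  show xs.foldl (fun acc x => PySem.List.insertBy
      (fun a b => decide (a.1 < b.1) || (!decide (b.1 < a.1) && decide (a.2 < b.2))) x acc) [] = xs
  have hb : xs.Pairwise (fun a b =>
      (fun x y => decide (x.1 < y.1) || (!decide (y.1 < x.1) && decide (x.2 < y.2))) b a = false) := by
    refine hp.imp ?_
    intro a b hab
    have h1 : ¬ b.1 < a.1 := asymm hab
    simp [h1, hab]
  exact (foldl_insertBy_append _ xs [] (by simp) hb).trans (List.nil_append xs)

-- pvPairs has strictly increasing first components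
lemma pvPairs_pairwise (N lo hi : Int) :
    (pvPairs N lo hi).Pairwise (fun a b => a.1 < b.1) := by
  unfold pvPairs
  rw [List.pairwise_filterMap]
  apply (PySem.List.pairwise_lt_pyRange_one lo (hi + 1)).imp
  intro a b hab p hp q hq
  simp only [pvG] at hp hq
  split_ifs at hp hq
  cases hp; cases hq
  exact hab

-- for z ≠ 0, isqrt(z²) = isqrt(z²+1) = |z|
lemma pyIsqrt_zsq (z : Int) : pyIsqrt (z * z) = |z| := by
  rw [← abs_mul_abs_self z]
  exact pyIsqrt_sq |z| (abs_nonneg z)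

lemma pyIsqrt_zsq1 (z : Int) (hz : z ≠ 0) : pyIsqrt (z * z + 1) = |z| := by
  have h1 : |z| ≤ pyIsqrt (z * z + 1) :=
    pyIsqrt_le (abs_nonneg z) (by rw [abs_mul_abs_self]; omega)
  have h2 : pyIsqrt (z * z + 1) < |z| + 1 := by
    refine pyIsqrt_lt (by nlinarith [mul_self_nonneg z])
      (by have := abs_nonneg z; omega) ?_
    have := abs_mul_abs_self z
    have hz1 : 1 ≤ |z| := by have := abs_pos.mpr hz; omega
    nlinarith
  omega

-- inside the scan range, the y ≤ hi bound is automatic: pvGA = pvG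
lemma pvGA_eq_pvG (z x : Int) (hx : 2 ≤ x) :
    pvGA (z * z + 1) x = pvG (z * z + 1) (pyIsqrt (z * z + 1)) x := by
  simp only [pvGA, pvG]
  split_ifs with h1 h2 h2
  · rfl
  · exfalso
    obtain ⟨hp, hsq, hxy⟩ := h1
    have hy0 : 0 ≤ pyIsqrt (z * z + 1 - x * x) := pyIsqrt_nonneg _
    have hyle : pyIsqrt (z * z + 1 - x * x) ≤ pyIsqrt (z * z + 1) :=
      pyIsqrt_le hy0 (by nlinarith)
    exact h2 ⟨hp, hsq, hxy, hyle⟩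
  · exact absurd ⟨h2.1, h2.2.1, h2.2.2.1⟩ h1
  · rfl

-- ===== VERDICT (by name: the statement is the Claim_ definition above) =====
theorem get_95_solution_family_spec : Claim_equal_get_95_solution_family := by
  unfold Claim_equal_get_95_solution_family
  intro z _
  show get_95_solution_family z = get_95_solution_family_alt z
  unfold get_95_solution_family get_95_solution_family_alt
  simp only []
  rw [foldl_A, List.nil_append, show z * z + 1 - 1 = z * z by ring]
  have hA : (PySem.List.pyRange 2 (pyIsqrt (z * z) + 1)).filterMap (pvGA (z * z + 1))
      = pvPairs (z * z + 1) 2 (pyIsqrt (z * z + 1)) := by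
    by_cases hz : z = 0
    · subst hz
      have h0 : pyIsqrt ((0:Int) * 0) = 0 := by simp [pyIsqrt]
      have h1 : pyIsqrt ((0:Int) * 0 + 1) = 1 := by
        norm_num [pyIsqrt]
      rw [h0, h1, pvPairs_nil (by omega)]
      rfl
    · have heq : pyIsqrt (z * z) = pyIsqrt (z * z + 1) := by
        rw [pyIsqrt_zsq, pyIsqrt_zsq1 z hz]
      rw [heq]
      unfold pvPairs
      apply List.filterMap_congr
      intro x hx
      rw [PySem.List.mem_pyRange_one] at hx
      exact pvGA_eq_pvG z x hx.1
  rw [hA, sorted2_eq_self _ (pvPairs_pairwise _ _ _),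
    twoPtrLoop_eq (z * z + 1) _ 2 (pyIsqrt (z * z + 1)) [] rfl (by omega), List.nil_append]
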